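-- pv_equiv track=rewrite | github.com/hmf09xoxo-design/Neural-Nexus | Backend/app/url_analysis/cookie_analyzer.py | _cookie_risk_points
-- ===== SOURCE A (Python) =====
-- RISK_WEIGHTS: dict[str, int] = {
--     "missing_http_only": 2,
--     "missing_secure": 2,
--     "same_site_none": 2,
--     "broad_domain_scope": 1,
-- }
--
-- def _cookie_risk_points(issues: list[str]) -> int:
--     """Convert issue strings into weighted risk points for one cookie."""
--     points = 0
--
--     if any("HttpOnly" in issue for issue in issues):
--         points += RISK_WEIGHTS["missing_http_only"]
--     if any("Secure" in issue for issue in issues):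
--         points += RISK_WEIGHTS["missing_secure"]
--     if any("SameSite=None" in issue for issue in issues):
--         points += RISK_WEIGHTS["same_site_none"]
--     if any("Broad domain scope" in issue for issue in issues):
--         points += RISK_WEIGHTS["broad_domain_scope"]
--
--     return points
-- ===== SOURCE B (Python) =====
-- RISK_WEIGHTS: dict[str, int] = {
--     "missing_http_only": 2,
--     "missing_secure": 2,
--     "same_site_none": 2,
--     "broad_domain_scope": 1,
-- }
--
-- _MARKERS = [
--     ("HttpOnly", "missing_http_only"),
--     ("Secure", "missing_secure"),
--     ("SameSite=None", "same_site_none"),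
--     ("Broad domain scope", "broad_domain_scope"),
-- ]
--
--
-- def _cookie_risk_points(issues: list[str]) -> int:
--     """Single pass over issues: collect the set of matched weight keys, then sum."""
--     matched = set()
--     for issue in issues:
--         for marker, key in _MARKERS:
--             if marker in issue:
--                 matched.add(key)
--     return sum(RISK_WEIGHTS[k] for k in matched)
-- ===== Notes on version B (the rewrite author's own statement) =====
-- stated objective: alternative
-- what changed: Replaced four independent any-scans of the issue list by a single traversal that records matched weight keys into a set via a marker-to-key table, then sums the weights of the matched set.
import Mathlib
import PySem

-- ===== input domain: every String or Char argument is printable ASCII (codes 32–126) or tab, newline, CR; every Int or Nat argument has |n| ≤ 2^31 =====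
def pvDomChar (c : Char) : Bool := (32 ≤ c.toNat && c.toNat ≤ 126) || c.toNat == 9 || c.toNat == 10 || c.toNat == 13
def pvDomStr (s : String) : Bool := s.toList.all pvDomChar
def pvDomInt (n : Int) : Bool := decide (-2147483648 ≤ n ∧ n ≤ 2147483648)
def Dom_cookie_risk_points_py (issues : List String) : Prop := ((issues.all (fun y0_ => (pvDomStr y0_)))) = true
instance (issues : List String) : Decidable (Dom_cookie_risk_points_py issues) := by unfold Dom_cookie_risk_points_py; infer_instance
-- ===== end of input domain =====

-- B replaces A's four independent any-scans of the issue list by one traversal that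
-- collects matched weight keys into a set via a marker→key table, then sums the weights (objective: alternative).

-- ===== PORT A =====
def RISK_WEIGHTS : PySem.Dict String Int :=
  PySem.Dict.ofList [("missing_http_only", 2), ("missing_secure", 2),
                     ("same_site_none", 2), ("broad_domain_scope", 1)]

def cookie_risk_points_py (issues : List String) : Int :=
  let points : Int := 0
  let points := if issues.any (fun issue => PySem.Str.isIn "HttpOnly" issue)
                then points + RISK_WEIGHTS.getD "missing_http_only" 0 else points
  let points := if issues.any (fun issue => PySem.Str.isIn "Secure" issue)
                then points + RISK_WEIGHTS.getD "missing_secure" 0 else points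
  let points := if issues.any (fun issue => PySem.Str.isIn "SameSite=None" issue)
                then points + RISK_WEIGHTS.getD "same_site_none" 0 else points
  let points := if issues.any (fun issue => PySem.Str.isIn "Broad domain scope" issue)
                then points + RISK_WEIGHTS.getD "broad_domain_scope" 0 else points
  points

-- ===== PORT B =====
def pvMarkers : List (String × String) :=
  [("HttpOnly", "missing_http_only"), ("Secure", "missing_secure"),
   ("SameSite=None", "same_site_none"), ("Broad domain scope", "broad_domain_scope")]

def cookie_risk_points_py_alt (issues : List String) : Int :=
  let matched : PySem.Set String :=
    issues.foldl
      (fun m issue =>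
        pvMarkers.foldl
          (fun m mk => if PySem.Str.isIn mk.1 issue then PySem.Set.add m mk.2 else m) m)
      PySem.Set.empty
  -- sum over the set (order-independent)
  (matched.map (fun k => RISK_WEIGHTS.getD k 0)).sum

-- ===== PRECONDITION & SPEC =====
def Spec_cookie_risk_points_py (issues : List String) (out : Int) : Prop := out = cookie_risk_points_py_alt issues
instance (issues : List String) (out : Int) : Decidable (Spec_cookie_risk_points_py issues out) := by unfold Spec_cookie_risk_points_py; infer_instance

-- ===== CLAIM (what is proved, stated in full; the proofs are below) =====
def Claim_equal_cookie_risk_points_py : Prop := ∀ (issues : List String), Dom_cookie_risk_points_py issues → Spec_cookie_risk_points_py issues (cookie_risk_points_py issues)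

-- ===== LEMMAS AND PROOFS =====

-- the inner marker loop of B, for one issue
def pvStep (m : PySem.Set String) (issue : String) : PySem.Set String :=
  pvMarkers.foldl
    (fun m mk => if PySem.Str.isIn mk.1 issue then PySem.Set.add m mk.2 else m) m

lemma pvMemIfAdd (s : PySem.Set String) (c : Bool) (k y : String) :
    (y ∈ (if c then PySem.Set.add s k else s)) ↔ y ∈ s ∨ (y = k ∧ c = true) := by
  cases c <;> simp [PySem.Set.mem_add]

lemma pvMerge (m E1 E2 E3 E4 a1 a2 a3 a4 b1 b2 b3 b4 : Prop) :
    ((m ∨ (E1 ∧ a1) ∨ (E2 ∧ a2) ∨ (E3 ∧ a3) ∨ (E4 ∧ a4)) ∨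
      ((E1 ∧ b1) ∨ (E2 ∧ b2) ∨ (E3 ∧ b3) ∨ (E4 ∧ b4))) ↔
    (m ∨ (E1 ∧ (a1 ∨ b1)) ∨ (E2 ∧ (a2 ∨ b2)) ∨ (E3 ∧ (a3 ∨ b3)) ∨ (E4 ∧ (a4 ∨ b4))) := by
  tauto

lemma pvStep_mem (m : PySem.Set String) (issue : String) (y : String) :
    y ∈ pvStep m issue ↔ y ∈ m ∨
      (y = "missing_http_only" ∧ PySem.Str.isIn "HttpOnly" issue = true) ∨
      (y = "missing_secure" ∧ PySem.Str.isIn "Secure" issue = true) ∨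
      (y = "same_site_none" ∧ PySem.Str.isIn "SameSite=None" issue = true) ∨
      (y = "broad_domain_scope" ∧ PySem.Str.isIn "Broad domain scope" issue = true) := by
  simp only [pvStep, pvMarkers, List.foldl_cons, List.foldl_nil, pvMemIfAdd, or_assoc]

lemma pvStep_nodup (m : PySem.Set String) (issue : String) (h : m.Nodup) :
    (pvStep m issue).Nodup := by
  simp only [pvStep, pvMarkers, List.foldl_cons, List.foldl_nil]
  split_ifs <;> (repeat apply PySem.Set.nodup_add) <;> exact h

lemma pvLoop_mem (issues : List String) (m : PySem.Set String) (y : String) :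
    y ∈ issues.foldl pvStep m ↔ y ∈ m ∨
      (y = "missing_http_only" ∧ issues.any (fun s => PySem.Str.isIn "HttpOnly" s) = true) ∨
      (y = "missing_secure" ∧ issues.any (fun s => PySem.Str.isIn "Secure" s) = true) ∨
      (y = "same_site_none" ∧ issues.any (fun s => PySem.Str.isIn "SameSite=None" s) = true) ∨
      (y = "broad_domain_scope" ∧ issues.any (fun s => PySem.Str.isIn "Broad domain scope" s) = true) := by
  induction issues generalizing m with
  | nil => simp
  | cons a t ih =>
    rw [List.foldl_cons, ih, pvStep_mem]
    simp only [List.any_cons, Bool.or_eq_true]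
    exact pvMerge _ _ _ _ _ _ _ _ _ _ _ _ _

lemma pvLoop_nodup (issues : List String) (m : PySem.Set String) (h : m.Nodup) :
    (issues.foldl pvStep m).Nodup := by
  induction issues generalizing m with
  | nil => exact h
  | cons a t ih => exact ih _ (pvStep_nodup _ _ h)

-- canonical list of matched keys, determined by the four any-conditions
def pvCanon (c1 c2 c3 c4 : Bool) : List String :=
  (if c1 then ["missing_http_only"] else []) ++ (if c2 then ["missing_secure"] else []) ++
  (if c3 then ["same_site_none"] else []) ++ (if c4 then ["broad_domain_scope"] else [])

lemma matched_perm (issues : List String) :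
    List.Perm (issues.foldl pvStep PySem.Set.empty)
      (pvCanon (issues.any (fun s => PySem.Str.isIn "HttpOnly" s))
               (issues.any (fun s => PySem.Str.isIn "Secure" s))
               (issues.any (fun s => PySem.Str.isIn "SameSite=None" s))
               (issues.any (fun s => PySem.Str.isIn "Broad domain scope" s))) := by
  cases h1 : issues.any (fun s => PySem.Str.isIn "HttpOnly" s) <;>
  cases h2 : issues.any (fun s => PySem.Str.isIn "Secure" s) <;>
  cases h3 : issues.any (fun s => PySem.Str.isIn "SameSite=None" s) <;>
  cases h4 : issues.any (fun s => PySem.Str.isIn "Broad domain scope" s) <;>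
  · refine (List.perm_ext_iff_of_nodup
      (pvLoop_nodup issues _ (by simp [PySem.Set.empty])) (by decide)).2 ?_
    intro y
    rw [pvLoop_mem, h1, h2, h3, h4]
    simp only [pvCanon, PySem.Set.empty]
    simp
    try tauto

lemma sum_canon (c1 c2 c3 c4 : Bool) :
    ((pvCanon c1 c2 c3 c4).map (fun k => RISK_WEIGHTS.getD k 0)).sum =
      (if c1 then (2 : Int) else 0) + (if c2 then 2 else 0) +
      (if c3 then 2 else 0) + (if c4 then 1 else 0) := by
  cases c1 <;> cases c2 <;> cases c3 <;> cases c4 <;> decide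

-- ===== VERDICT (by name: the statement is the Claim_ definition above) =====
theorem cookie_risk_points_py_spec : Claim_equal_cookie_risk_points_py := by
  intro issues _
  unfold Spec_cookie_risk_points_py cookie_risk_points_py cookie_risk_points_py_alt
  show _ = ((issues.foldl pvStep PySem.Set.empty).map (fun k => RISK_WEIGHTS.getD k 0)).sum
  rw [((matched_perm issues).map (fun k => RISK_WEIGHTS.getD k 0)).sum_eq, sum_canon]
  cases h1 : issues.any (fun issue => PySem.Str.isIn "HttpOnly" issue) <;>
  cases h2 : issues.any (fun issue => PySem.Str.isIn "Secure" issue) <;>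
  cases h3 : issues.any (fun issue => PySem.Str.isIn "SameSite=None" issue) <;>
  cases h4 : issues.any (fun issue => PySem.Str.isIn "Broad domain scope" issue) <;>
  decide
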